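-- pv_equiv track=rewrite | github.com/JayAllison/aoc2018 | day6/day6_puzzle1.py | find_closest_position
-- ===== SOURCE A (Python) =====
-- def manhattan_distance(coord1, coord2):
--     return abs(coord1[0]-coord2[0]) + abs(coord1[1]-coord2[1])
--
-- def find_closest_position(positions, coordinate):
--     closest_distance = 1000*1000
--     closest_place = None
--     for p in positions:
--         distance = manhattan_distance(coordinate, positions[p])
--         if distance < closest_distance:
--             closest_distance = distance
--             closest_place = p
--     for p in positions:
--         distance = manhattan_distance(coordinate, positions[p])
--         if distance == closest_distance and p != closest_place:
--             return None
--     return closest_place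
-- ===== SOURCE B (Python) =====
-- def manhattan_distance(coord1, coord2):
--     return abs(coord1[0]-coord2[0]) + abs(coord1[1]-coord2[1])
--
-- def find_closest_position(positions, coordinate):
--     # single pass: track the running minimum and a tie flag instead of rescanning
--     closest_distance = 1000*1000
--     closest_place = None
--     tied = False
--     for p in positions:
--         distance = manhattan_distance(coordinate, positions[p])
--         if distance < closest_distance:
--             closest_distance = distance
--             closest_place = p
--             tied = False
--         elif distance == closest_distance and p != closest_place:
--             tied = True
--     return None if tied else closest_place
-- ===== Notes on version B (the rewrite author's own statement) =====
-- stated objective: simpler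
-- what changed: Replaces A's two scans (one to find the minimum distance, a second rescan to detect a tie) by a single loop that maintains the running minimum together with a tie flag that is reset whenever a strictly smaller distance appears.
import Mathlib
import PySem

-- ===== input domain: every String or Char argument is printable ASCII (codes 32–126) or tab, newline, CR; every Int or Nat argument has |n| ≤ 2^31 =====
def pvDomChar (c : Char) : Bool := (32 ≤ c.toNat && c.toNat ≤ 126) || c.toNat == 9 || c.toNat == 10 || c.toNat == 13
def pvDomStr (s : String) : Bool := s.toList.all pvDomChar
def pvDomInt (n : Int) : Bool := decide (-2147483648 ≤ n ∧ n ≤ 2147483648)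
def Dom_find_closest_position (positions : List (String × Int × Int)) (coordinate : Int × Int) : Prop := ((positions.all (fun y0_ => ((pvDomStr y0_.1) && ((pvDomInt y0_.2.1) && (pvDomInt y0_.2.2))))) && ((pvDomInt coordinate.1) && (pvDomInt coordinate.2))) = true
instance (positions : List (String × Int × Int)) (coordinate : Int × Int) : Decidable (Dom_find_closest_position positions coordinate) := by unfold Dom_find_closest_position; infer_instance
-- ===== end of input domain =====

-- B merges A's two scans into one pass that maintains the running minimum and a tie flag (objective: simpler).


-- ===== PORT A =====
def manhattan_distance (coord1 coord2 : Int × Int) : Int :=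
  |coord1.1 - coord2.1| + |coord1.2 - coord2.2|

-- A's second loop with its early `return None` (scans the keys against the final minimum)
def fcp_scan (d : PySem.Dict String (Int × Int)) (coordinate : Int × Int)
    (closest_distance : Int) (closest_place : Option String) : List String → Option String
  | [] => closest_place
  | p :: rest =>
      let distance := manhattan_distance coordinate (d.getD p (0, 0))
      if distance == closest_distance && some p != closest_place then none
      else fcp_scan d coordinate closest_distance closest_place rest

def find_closest_position (positions : List (String × Int × Int)) (coordinate : Int × Int) : Option String :=
  let d := PySem.Dict.ofList positions
  let st := d.keys.foldl
    (fun (st : Int × Option String) p =>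
      let distance := manhattan_distance coordinate (d.getD p (0, 0))
      if distance < st.1 then (distance, some p) else st)
    (1000 * 1000, none)
  fcp_scan d coordinate st.1 st.2 d.keys

-- ===== PORT B =====
def find_closest_position_alt (positions : List (String × Int × Int)) (coordinate : Int × Int) : Option String :=
  let d := PySem.Dict.ofList positions
  let st := d.keys.foldl
    (fun (st : Int × Option String × Bool) p =>
      let distance := manhattan_distance coordinate (d.getD p (0, 0))
      if distance < st.1 then (distance, some p, false)
      else if distance == st.1 && some p != st.2.1 then (st.1, st.2.1, true)
      else st)
    (1000 * 1000, none, false)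
  if st.2.2 then none else st.2.1

-- ===== PRECONDITION & SPEC =====
def Spec_find_closest_position (positions : List (String × Int × Int)) (coordinate : Int × Int) (out : Option String) : Prop := out = find_closest_position_alt positions coordinate
instance (positions : List (String × Int × Int)) (coordinate : Int × Int) (out : Option String) : Decidable (Spec_find_closest_position positions coordinate out) := by unfold Spec_find_closest_position; infer_instance

-- ===== CLAIM (what is proved, stated in full; the proofs are below) =====
def Claim_equal_find_closest_position : Prop := ∀ (positions : List (String × Int × Int)) (coordinate : Int × Int), Dom_find_closest_position positions coordinate → Spec_find_closest_position positions coordinate (find_closest_position positions coordinate)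

-- ===== LEMMAS AND PROOFS =====

-- A's first loop, over an arbitrary distance function f
def fcpA (f : String → Int) (ks : List String) (s : Int × Option String) : Int × Option String :=
  ks.foldl (fun st p => if f p < st.1 then (f p, some p) else st) s

-- B's loop, over an arbitrary distance function f
def fcpB (f : String → Int) (ks : List String) (s : Int × Option String × Bool) : Int × Option String × Bool :=
  ks.foldl (fun st p =>
    if f p < st.1 then (f p, some p, false)
    else if f p == st.1 && some p != st.2.1 then (st.1, st.2.1, true)
    else st) s

theorem fcpA_cons (f : String → Int) (p : String) (rest : List String) (c : Int) (pl : Option String) :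
    fcpA f (p :: rest) (c, pl) = fcpA f rest (if f p < c then (f p, some p) else (c, pl)) := rfl

theorem fcpB_cons (f : String → Int) (p : String) (rest : List String) (c : Int) (pl : Option String) (t : Bool) :
    fcpB f (p :: rest) (c, pl, t) =
      fcpB f rest (if f p < c then (f p, some p, false)
        else if f p == c && some p != pl then (c, pl, true) else (c, pl, t)) := rfl

theorem fcpA_fst_le (f : String → Int) (ks : List String) (c : Int) (pl : Option String) :
    (fcpA f ks (c, pl)).1 ≤ c := by
  induction ks generalizing c pl with
  | nil => simp [fcpA]
  | cons p rest ih =>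
    rw [fcpA_cons]
    by_cases hlt : f p < c
    · rw [if_pos hlt]; exact le_trans (ih _ _) (by omega)
    · rw [if_neg hlt]; exact ih _ _

theorem fcpA_snd_of_fst_eq (f : String → Int) (ks : List String) (c : Int) (pl : Option String)
    (h : (fcpA f ks (c, pl)).1 = c) : (fcpA f ks (c, pl)).2 = pl := by
  induction ks generalizing c pl with
  | nil => simp [fcpA]
  | cons p rest ih =>
    by_cases hlt : f p < c
    · rw [fcpA_cons, if_pos hlt] at h
      have := fcpA_fst_le f rest (f p) (some p)
      omega
    · rw [fcpA_cons, if_neg hlt] at h ⊢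
      exact ih _ _ h

theorem fcpB_eq (f : String → Int) (ks : List String) (c : Int) (pl : Option String) (t : Bool) :
    fcpB f ks (c, pl, t) =
      ((fcpA f ks (c, pl)).1, (fcpA f ks (c, pl)).2,
        ((t && decide ((fcpA f ks (c, pl)).1 = c)) ||
          ks.any (fun p => f p == (fcpA f ks (c, pl)).1 && some p != (fcpA f ks (c, pl)).2))) := by
  induction ks generalizing c pl t with
  | nil => simp [fcpA, fcpB]
  | cons p rest ih =>
    rw [fcpA_cons, fcpB_cons, List.any_cons]
    by_cases hlt : f p < c
    · simp only [if_pos hlt]; rw [ih]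
      have hle := fcpA_fst_le f rest (f p) (some p)
      have hned : decide ((fcpA f rest (f p, some p)).1 = c) = false := by
        simp only [decide_eq_false_iff_not]; omega
      have hgp : (f p == (fcpA f rest (f p, some p)).1 && some p != (fcpA f rest (f p, some p)).2) = false := by
        by_cases heq : (fcpA f rest (f p, some p)).1 = f p
        · have hpl := fcpA_snd_of_fst_eq f rest (f p) (some p) heq
          simp [heq, hpl]
        · have : (f p == (fcpA f rest (f p, some p)).1) = false := by
            simp only [beq_eq_false_iff_ne, ne_eq]
            intro h; exact heq h.symm
          simp [this]
      simp [hned, hgp]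
    · simp only [if_neg hlt]
      have hle := fcpA_fst_le f rest c pl
      by_cases htie : (f p == c && some p != pl) = true
      · simp only [if_pos htie]; rw [ih]
        have h1' : f p = c := by
          have := (Bool.and_eq_true_iff.mp htie).1; simpa using this
        have h2' : some p ≠ pl := by
          have := (Bool.and_eq_true_iff.mp htie).2; simpa using this
        by_cases heq : (fcpA f rest (c, pl)).1 = c
        · have hpl := fcpA_snd_of_fst_eq f rest c pl heq
          simp [heq, hpl, h1', h2']
        · have hgp : (f p == (fcpA f rest (c, pl)).1 && some p != (fcpA f rest (c, pl)).2) = false := by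
            have : (f p == (fcpA f rest (c, pl)).1) = false := by
              simp only [beq_eq_false_iff_ne, ne_eq]
              intro h; exact heq (h1'.symm.trans h).symm
            simp [this]
          simp [heq, hgp]
      · simp only [if_neg htie]; rw [ih]
        have hgp : (f p == (fcpA f rest (c, pl)).1 && some p != (fcpA f rest (c, pl)).2) = false := by
          by_cases heq : (fcpA f rest (c, pl)).1 = c
          · have hpl := fcpA_snd_of_fst_eq f rest c pl heq
            rw [heq, hpl]; simpa using htie
          · have hlt2 : (fcpA f rest (c, pl)).1 < c := lt_of_le_of_ne hle heq
            have : (f p == (fcpA f rest (c, pl)).1) = false := by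
              simp only [beq_eq_false_iff_ne, ne_eq]; omega
            simp [this]
        simp [hgp]

theorem fcp_scan_eq (d : PySem.Dict String (Int × Int)) (coordinate : Int × Int)
    (c : Int) (pl : Option String) (ks : List String) :
    fcp_scan d coordinate c pl ks =
      if ks.any (fun p => manhattan_distance coordinate (d.getD p (0, 0)) == c && some p != pl)
      then none else pl := by
  induction ks with
  | nil => simp [fcp_scan]
  | cons p rest ih =>
    simp only [fcp_scan, List.any_cons]
    by_cases h : (manhattan_distance coordinate (d.getD p (0, 0)) == c && some p != pl) = true
    · simp [h]
    · simp only [Bool.not_eq_true] at h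
      simp [h, ih]

-- ===== VERDICT (by name: the statement is the Claim_ definition above) =====
theorem find_closest_position_spec : Claim_equal_find_closest_position := by
  intro positions coordinate _
  unfold Spec_find_closest_position find_closest_position find_closest_position_alt
  set d := PySem.Dict.ofList positions with hd
  set f : String → Int := fun p => manhattan_distance coordinate (d.getD p (0, 0)) with hf
  show fcp_scan d coordinate (fcpA f d.keys (1000 * 1000, none)).1
      (fcpA f d.keys (1000 * 1000, none)).2 d.keys =
    (if (fcpB f d.keys (1000 * 1000, none, false)).2.2 then none
     else (fcpB f d.keys (1000 * 1000, none, false)).2.1)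
  rw [fcpB_eq, fcp_scan_eq]
  simp [hf]
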